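-- pv_equiv track=rewrite | github.com/fracivilization/thesaurus-based-ner | src/dataset/gold_dataset.py | snt_split_conll
-- ===== SOURCE A (Python) =====
-- from typing import List, Dict, Tuple
--
-- def snt_split_conll(
--     tokens: List[str], tags: List[str], split_ids: List[int]
-- ) -> List[Dict]:
--     tokenss = []
--     tagss = []
--     for s, e in zip(split_ids, split_ids[1:]):
--         if tags[s].startswith("I-"):
--             tokenss[-1] += tokens[s:e]
--             tagss[-1] += tags[s:e]
--         else:
--             tokenss.append(tokens[s:e])
--             tagss.append(tags[s:e])
--
--     return [{"tokens": tok, "tags": tag} for tok, tag in zip(tokenss, tagss)]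
-- ===== SOURCE B (Python) =====
-- def snt_split_conll(tokens, tags, split_ids):
--     # One reverse pass: trailing "I-" segments are collected into a pending
--     # buffer and flushed into the sentence that opens them; leading "I-"
--     # segments with no opening sentence (where the original raises) are dropped.
--     sentences = []
--     pend_tok, pend_tag = [], []
--     for s, e in reversed(list(zip(split_ids, split_ids[1:]))):
--         seg_tok, seg_tag = tokens[s:e], tags[s:e]
--         if tags[s].startswith("I-"):
--             pend_tok = seg_tok + pend_tok
--             pend_tag = seg_tag + pend_tag
--         else:
--             sentences.insert(0, {"tokens": seg_tok + pend_tok, "tags": seg_tag + pend_tag})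
--             pend_tok, pend_tag = [], []
--     return sentences
-- ===== Notes on version B (the rewrite author's own statement) =====
-- stated objective: alternative
-- what changed: Replaces the forward loop that mutates the last of two parallel sentence lists via [-1] with a single reverse pass that accumulates trailing 'I-' segments in a pending buffer and emits a finished sentence dict whenever a non-'I-' segment is reached.
import Mathlib
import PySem

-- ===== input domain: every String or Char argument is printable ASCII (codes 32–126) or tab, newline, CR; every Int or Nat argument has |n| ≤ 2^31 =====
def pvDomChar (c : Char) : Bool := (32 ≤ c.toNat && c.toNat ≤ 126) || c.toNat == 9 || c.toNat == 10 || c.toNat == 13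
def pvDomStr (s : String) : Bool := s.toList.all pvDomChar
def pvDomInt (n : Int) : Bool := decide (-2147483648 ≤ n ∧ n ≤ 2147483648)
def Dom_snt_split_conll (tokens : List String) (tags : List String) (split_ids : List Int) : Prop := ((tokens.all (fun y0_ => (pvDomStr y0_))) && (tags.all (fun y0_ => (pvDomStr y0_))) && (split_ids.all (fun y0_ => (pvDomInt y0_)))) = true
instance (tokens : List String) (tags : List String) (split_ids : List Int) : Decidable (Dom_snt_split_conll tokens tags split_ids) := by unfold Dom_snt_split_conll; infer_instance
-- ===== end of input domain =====

-- B replaces A's forward loop mutating two parallel lists via [-1] with one reverse pass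
-- carrying a pending buffer (objective: alternative; same asymptotic cost).


-- shared trivia: xs[s:e] for a pair, and the "tags[s].startswith('I-')" test
def pvSliceP (xs : List String) (p : Int × Int) : List String :=
  PySem.List.slice xs (some p.1) (some p.2)
def pvIsI (tags : List String) (s : Int) : Bool :=
  PySem.Str.startswith (PySem.List.pyGetD tags s "") "I-"

-- ===== PORT A =====
-- xs[-1] += v : modify the last element (no-op on [], where Python raises — excluded by Pre_)
def pvModLast {α : Type} (f : α → α) : List α → List α
  | [] => []
  | [x] => [f x]
  | x :: y :: xs => x :: pvModLast f (y :: xs)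

def pvStepA (tokens tags : List String) (st : List (List String) × List (List String))
    (p : Int × Int) : List (List String) × List (List String) :=
  if pvIsI tags p.1 then
    (pvModLast (· ++ pvSliceP tokens p) st.1, pvModLast (· ++ pvSliceP tags p) st.2)
  else
    (st.1 ++ [pvSliceP tokens p], st.2 ++ [pvSliceP tags p])

def snt_split_conll (tokens : List String) (tags : List String) (split_ids : List Int) : List (List (String × List String)) :=
  let pairs := split_ids.zip (PySem.List.slice split_ids (some 1) none)
  let st := pairs.foldl (pvStepA tokens tags) ([], [])
  (st.1.zip st.2).map (fun tg => [("tokens", tg.1), ("tags", tg.2)])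

-- ===== PORT B =====
def pvStepB (tokens tags : List String) (p : Int × Int)
    (st : List (List (String × List String)) × List String × List String) :
    List (List (String × List String)) × List String × List String :=
  if pvIsI tags p.1 then
    (st.1, pvSliceP tokens p ++ st.2.1, pvSliceP tags p ++ st.2.2)
  else
    ([("tokens", pvSliceP tokens p ++ st.2.1), ("tags", pvSliceP tags p ++ st.2.2)] :: st.1, [], [])

def snt_split_conll_alt (tokens : List String) (tags : List String) (split_ids : List Int) : List (List (String × List String)) :=
  let pairs := split_ids.zip (PySem.List.slice split_ids (some 1) none)
  (pairs.foldr (pvStepB tokens tags) ([], [], [])).1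

-- ===== PRECONDITION & SPEC =====
-- Pre_ excludes exactly the inputs where A raises: an out-of-range tags[s] index
-- (IndexError) or a first segment whose tag starts with "I-" (tokenss[-1] on []).
def Pre_snt_split_conll (tokens : List String) (tags : List String) (split_ids : List Int) : Prop :=
  (∀ p ∈ split_ids.zip (split_ids.drop 1), PySem.Raise.InRange tags.length p.1) ∧
  (2 ≤ split_ids.length → pvIsI tags (split_ids.headD 0) = false)
instance (tokens : List String) (tags : List String) (split_ids : List Int) : Decidable (Pre_snt_split_conll tokens tags split_ids) := by unfold Pre_snt_split_conll; infer_instance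

def pvWitness_snt_split_conll : List String × List String × List Int :=
  (["a", "b", "c"], ["B-X", "I-X", "O"], [0, 1, 2, 3])

def Spec_snt_split_conll (tokens : List String) (tags : List String) (split_ids : List Int) (out : List (List (String × List String))) : Prop := out = snt_split_conll_alt tokens tags split_ids
instance (tokens : List String) (tags : List String) (split_ids : List Int) (out : List (List (String × List String))) : Decidable (Spec_snt_split_conll tokens tags split_ids out) := by unfold Spec_snt_split_conll; infer_instance

-- ===== CLAIM (what is proved, stated in full; the proofs are below) =====
def Claim_equal_snt_split_conll : Prop := ∀ (tokens : List String) (tags : List String) (split_ids : List Int), Dom_snt_split_conll tokens tags split_ids → Pre_snt_split_conll tokens tags split_ids → Spec_snt_split_conll tokens tags split_ids (snt_split_conll tokens tags split_ids)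
-- ===== LEMMAS AND PROOFS =====
-- The sentences A's fold will still produce given an open sentence (t, g) and remaining pairs
def pvClose (tokens tags : List String) (t g : List String) : List (Int × Int) → List (List String × List String)
  | [] => [(t, g)]
  | p :: r =>
    if pvIsI tags p.1 then pvClose tokens tags (t ++ pvSliceP tokens p) (g ++ pvSliceP tags p) r
    else (t, g) :: pvClose tokens tags (pvSliceP tokens p) (pvSliceP tags p) r

theorem pvModLast_append {α : Type} (f : α → α) (xs : List α) (x : α) :
    pvModLast f (xs ++ [x]) = xs ++ [f x] := by
  induction xs with
  | nil => rfl
  | cons a as ih =>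
    cases as with
    | nil => rfl
    | cons b bs => simpa [pvModLast] using ih

theorem pvFoldA_close (tokens tags : List String) (l : List (Int × Int)) :
    ∀ (ts gs : List (List String)) (t g : List String),
      l.foldl (pvStepA tokens tags) (ts ++ [t], gs ++ [g]) =
        (ts ++ (pvClose tokens tags t g l).map Prod.fst,
         gs ++ (pvClose tokens tags t g l).map Prod.snd) := by
  induction l with
  | nil => intro ts gs t g; simp [pvClose]
  | cons p r ih =>
    intro ts gs t g
    by_cases h : pvIsI tags p.1 = true
    · simp only [List.foldl_cons, pvStepA, h, if_pos, pvModLast_append, pvClose]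
      rw [ih]
    · simp only [List.foldl_cons, pvStepA, h, if_neg, Bool.not_eq_true, pvClose]
      rw [ih (ts ++ [t]) (gs ++ [g])]
      simp [List.append_assoc]

theorem pvFoldB_close (tokens tags : List String) (l : List (Int × Int)) :
    ∀ (t g : List String),
      (pvClose tokens tags t g l).map (fun tg => [("tokens", tg.1), ("tags", tg.2)]) =
        [("tokens", t ++ (l.foldr (pvStepB tokens tags) ([], [], [])).2.1),
         ("tags", g ++ (l.foldr (pvStepB tokens tags) ([], [], [])).2.2)] ::
          (l.foldr (pvStepB tokens tags) ([], [], [])).1 := by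
  induction l with
  | nil => intro t g; simp [pvClose]
  | cons p r ih =>
    intro t g
    by_cases h : pvIsI tags p.1 = true
    · simp only [pvClose, h, if_pos, List.foldr_cons, pvStepB, ih, List.append_assoc]
    · simp only [pvClose, h, if_neg, Bool.not_eq_true, List.foldr_cons, pvStepB, List.map_cons, ih]
      simp

theorem pvZip_map_fst_snd {α β : Type} (l : List (α × β)) :
    (l.map Prod.fst).zip (l.map Prod.snd) = l := by
  induction l with
  | nil => rfl
  | cons a l ih => simp [ih]

-- ===== VERDICT (by name: the statement is the Claim_ definition above) =====
theorem snt_split_conll_spec : Claim_equal_snt_split_conll := by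
  intro tokens tags split_ids _ hpre
  unfold Spec_snt_split_conll snt_split_conll snt_split_conll_alt
  rw [PySem.List.slice_from_one]
  match split_ids with
  | [] => rfl
  | [s] => rfl
  | s₀ :: s₁ :: rest =>
    have hfirst : pvIsI tags s₀ = false := by
      have := hpre.2 (by simp only [List.length_cons]; omega)
      simpa using this
    simp only [List.tail_cons, List.zip_cons_cons, List.foldl_cons, List.foldr_cons]
    rw [show pvStepA tokens tags ([], []) (s₀, s₁) =
          ([] ++ [pvSliceP tokens (s₀, s₁)], [] ++ [pvSliceP tags (s₀, s₁)]) by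
        simp [pvStepA, hfirst]]
    rw [pvFoldA_close]
    simp only [List.nil_append, pvZip_map_fst_snd, pvFoldB_close, pvStepB, hfirst,
      Bool.false_eq_true]
    simp
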